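-- pv_equiv track=rewrite | github.com/MastorAaron/bio-syntax-colorer | devTools/colorSliderToggle.py | addSchema
-- ===== SOURCE A (Python) =====
-- SCHEMA_LINE = '"$schema": "vscode://schemas/color-theme",'
--
-- def addSchema(lines):
--     newLines = []
--     inserted = False
--     for line in lines:
--         newLines.append(line)
--         if not inserted and line.strip() == "{":
--             newLines.append(f'  {SCHEMA_LINE}\n')
--             inserted = True
--     return newLines
-- ===== SOURCE B (Python) =====
-- SCHEMA_LINE = '"$schema": "vscode://schemas/color-theme",'
--
-- def addSchema(lines):
--     lines = list(lines)
--     i = next((k for k, l in enumerate(lines) if l.strip() == "{"), None)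
--     if i is None:
--         return lines
--     return lines[:i + 1] + [f'  {SCHEMA_LINE}\n'] + lines[i + 1:]
-- ===== Notes on version B (the rewrite author's own statement) =====
-- stated objective: alternative
-- what changed: Replaced the accumulate-with-inserted-flag loop by a locate phase (index of the first line stripping to '{') followed by a single list splice, with a plain copy when no such line exists.
import Mathlib
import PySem

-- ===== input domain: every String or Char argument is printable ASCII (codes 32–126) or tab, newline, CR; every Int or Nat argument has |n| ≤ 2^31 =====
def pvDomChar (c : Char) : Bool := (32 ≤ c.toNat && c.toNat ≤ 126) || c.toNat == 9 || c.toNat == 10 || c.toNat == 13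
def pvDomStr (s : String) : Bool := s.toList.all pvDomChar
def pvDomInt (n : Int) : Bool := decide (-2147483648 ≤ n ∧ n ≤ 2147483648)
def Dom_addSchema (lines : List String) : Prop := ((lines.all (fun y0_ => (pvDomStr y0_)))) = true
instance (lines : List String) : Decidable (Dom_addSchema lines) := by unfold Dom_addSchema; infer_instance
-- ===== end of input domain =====

-- B replaces A's accumulate-with-inserted-flag loop by a locate-the-index phase plus a single splice (alternative decomposition, same cost).

def pvSchemaLine : String := "  \"$schema\": \"vscode://schemas/color-theme\",\n"

-- ===== PORT A =====
def addSchema (lines : List String) : List String :=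
  (lines.foldl
    (fun (st : List String × Bool) line =>
      let newLines := st.1 ++ [line]
      if !st.2 && (PySem.Str.strip line == "{") then
        (newLines ++ [pvSchemaLine], true)
      else
        (newLines, st.2))
    ([], false)).1

-- ===== PORT B =====
def addSchema_alt (lines : List String) : List String :=
  match lines.findIdx? (fun l => PySem.Str.strip l == "{") with
  | none => lines
  | some i => lines.take (i + 1) ++ [pvSchemaLine] ++ lines.drop (i + 1)

-- ===== PRECONDITION & SPEC =====
def Spec_addSchema (lines : List String) (out : List String) : Prop := out = addSchema_alt lines
instance (lines : List String) (out : List String) : Decidable (Spec_addSchema lines out) := by unfold Spec_addSchema; infer_instance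

-- ===== CLAIM (what is proved, stated in full; the proofs are below) =====
def Claim_equal_addSchema : Prop := ∀ (lines : List String), Dom_addSchema lines → Spec_addSchema lines (addSchema lines)

-- ===== LEMMAS AND PROOFS =====

-- the loop body of A, named for the proofs
def pvStepA (st : List String × Bool) (line : String) : List String × Bool :=
  let newLines := st.1 ++ [line]
  if !st.2 && (PySem.Str.strip line == "{") then
    (newLines ++ [pvSchemaLine], true)
  else
    (newLines, st.2)

theorem addSchema_eq_foldl (lines : List String) :
    addSchema lines = (lines.foldl pvStepA ([], false)).1 := rfl

-- the accumulator only grows on the right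
theorem foldl_acc_append (lines : List String) (acc : List String) (ins : Bool) :
    lines.foldl pvStepA (acc, ins) =
      (acc ++ (lines.foldl pvStepA ([], ins)).1, (lines.foldl pvStepA ([], ins)).2) := by
  induction lines generalizing acc ins with
  | nil => simp
  | cons l rest ih =>
    simp only [List.foldl_cons, pvStepA]
    by_cases h : (!ins && (PySem.Str.strip l == "{")) = true
    · simp only [if_pos h]
      rw [ih (acc ++ [l] ++ [pvSchemaLine]) true, ih ([] ++ [l] ++ [pvSchemaLine]) true]
      simp
    · simp only [if_neg h]
      rw [ih (acc ++ [l]) ins, ih ([] ++ [l]) ins]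
      simp

-- once inserted, the loop just copies
theorem foldl_true (lines : List String) :
    lines.foldl pvStepA ([], true) = (lines, true) := by
  induction lines with
  | nil => rfl
  | cons l rest ih =>
    have hstep : (l :: rest).foldl pvStepA ([], true) = rest.foldl pvStepA ([l], true) := by
      simp [pvStepA]
    rw [hstep, foldl_acc_append rest [l] true, ih]
    simp

theorem addSchema_eq (lines : List String) : addSchema lines = addSchema_alt lines := by
  induction lines with
  | nil => rfl
  | cons l rest ih =>
    rw [addSchema_eq_foldl]
    simp only [List.foldl_cons, pvStepA, Bool.not_false, Bool.true_and, List.nil_append]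
    by_cases h : (PySem.Str.strip l == "{") = true
    · rw [if_pos h, foldl_acc_append rest ([l] ++ [pvSchemaLine]) true, foldl_true]
      simp [addSchema_alt, List.findIdx?_cons, h]
    · rw [if_neg h, foldl_acc_append rest [l] false]
      have hrec : (rest.foldl pvStepA ([], false)).1 = addSchema_alt rest := by
        rw [← addSchema_eq_foldl]; exact ih
      rw [hrec]
      simp only [addSchema_alt, List.findIdx?_cons, h]
      cases rest.findIdx? (fun l => PySem.Str.strip l == "{") with
      | none => simp
      | some i => simp [List.take_succ_cons, List.drop_succ_cons]

theorem addSchema_spec : Claim_equal_addSchema := by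
  intro lines _
  exact addSchema_eq lines
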